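-- pv_equiv track=rewrite | github.com/z-a-f/LoA_Game | LoA_Game/linesofaction/_utils.py | line_coords
-- ===== SOURCE A (Python) =====
-- def line_coords(shape, pivot_position, orientation):
--     '''Creates coordinates for the given direction and pivot position.
--
--     Args:
--         pivot_position (tuple): Pivot position for the mask.
--         orientation (str): Orientation of the line in the mask
--             One of 'horizontal', 'vertical', 'diagonal', 'antidiagonal'.
--             Or shorthand 'h', 'v', 'd', 'a'.
--     '''
--     row, col = pivot_position
--     if row >= shape[0] or col >= shape[1]:
--         raise ValueError(f'Pivot position {pivot_position} is out of bounds for shape {shape}')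
--     row = row % shape[0]
--     col = col % shape[1]
--     assert orientation in ['horizontal', 'vertical', 'diagonal', 'antidiagonal', 'h', 'v', 'd', 'a'], f'Invalid orientation: {orientation}'
--
--     coords = None
--
--     if orientation in ['h', 'horizontal']:
--         coords = ((row, i) for i in range(shape[1]))
--     elif orientation in ['v', 'vertical']:
--         coords = ((i, col) for i in range(shape[0]))
--     elif orientation in ['d', 'diagonal']:
--         offset = min(row, col)  # Move to the top-left corner
--         row -= offset
--         col -= offset
--         min_range = range(min(shape[0]-row, shape[1]-col))
--         coords = ((row+i, col+i) for i in min_range)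
--     elif orientation in ['a', 'antidiagonal']:
--         offset = min(row, shape[1]-col-1)  # Move to the top-right corner
--         row -= offset
--         col += offset
--         min_range = range(min(shape[0]-row, col+1))
--         coords = ((row+i, col-i) for i in min_range)
--     return set(coords)
-- ===== SOURCE B (Python) =====
-- def line_coords(shape, pivot_position, orientation):
--     '''Same result by a bidirectional walk: step back from the pivot to the
--     start of the line, then collect cells forward while in bounds.'''
--     row, col = pivot_position
--     if row >= shape[0] or col >= shape[1]:
--         raise ValueError(f'Pivot position {pivot_position} is out of bounds for shape {shape}')
--     row = row % shape[0]
--     col = col % shape[1]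
--     assert orientation in ['horizontal', 'vertical', 'diagonal', 'antidiagonal', 'h', 'v', 'd', 'a'], f'Invalid orientation: {orientation}'
--
--     dr, dc = {'h': (0, 1), 'horizontal': (0, 1),
--               'v': (1, 0), 'vertical': (1, 0),
--               'd': (1, 1), 'diagonal': (1, 1),
--               'a': (1, -1), 'antidiagonal': (1, -1)}[orientation]
--
--     def inb(r, c):
--         return 0 <= r < shape[0] and 0 <= c < shape[1]
--
--     # walk back to the first cell of the line
--     while inb(row - dr, col - dc):
--         row -= dr
--         col -= dc
--     # collect forward
--     coords = set()
--     while inb(row, col):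
--         coords.add((row, col))
--         row += dr
--         col += dc
--     return coords
-- ===== Notes on version B (the rewrite author's own statement) =====
-- stated objective: alternative
-- what changed: Replaces A's per-orientation offset/min-range arithmetic with one generic bidirectional walk: orientation maps to a step delta, B walks back from the pivot to the line's first cell and then collects cells forward while in bounds.
-- outside the precondition, e.g. on line_coords((-2, 3), (-3, 0), 'h'): A returns {(-1, 0), (-1, 1), (-1, 2)}, B returns set()
import Mathlib
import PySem

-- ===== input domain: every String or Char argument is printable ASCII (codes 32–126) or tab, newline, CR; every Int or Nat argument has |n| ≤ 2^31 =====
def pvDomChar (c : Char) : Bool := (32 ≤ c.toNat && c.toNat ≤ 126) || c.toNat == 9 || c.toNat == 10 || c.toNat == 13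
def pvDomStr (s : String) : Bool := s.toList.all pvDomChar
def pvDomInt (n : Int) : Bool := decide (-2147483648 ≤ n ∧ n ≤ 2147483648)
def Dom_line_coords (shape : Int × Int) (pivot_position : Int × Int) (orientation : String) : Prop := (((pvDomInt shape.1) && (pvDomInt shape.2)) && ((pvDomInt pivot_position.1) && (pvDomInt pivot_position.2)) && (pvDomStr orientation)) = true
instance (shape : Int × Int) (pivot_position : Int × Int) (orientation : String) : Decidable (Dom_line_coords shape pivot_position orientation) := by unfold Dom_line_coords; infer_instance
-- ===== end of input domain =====

-- B replaces A's per-orientation offset/min-range arithmetic by one generic bidirectional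
-- walk along the orientation's step delta (objective: alternative decomposition, same cost).

-- ===== PORT A =====
-- literal transliteration of A; the ValueError / assert paths are excluded by Pre_line_coords
def line_coords (shape : Int × Int) (pivot_position : Int × Int) (orientation : String) : List (Int × Int) :=
  let row := PySem.Int.mod pivot_position.1 shape.1
  let col := PySem.Int.mod pivot_position.2 shape.2
  if orientation = "h" ∨ orientation = "horizontal" then
    PySem.Set.ofList ((PySem.List.pyRange 0 shape.2 1).map (fun i => (row, i)))
  else if orientation = "v" ∨ orientation = "vertical" then
    PySem.Set.ofList ((PySem.List.pyRange 0 shape.1 1).map (fun i => (i, col)))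
  else if orientation = "d" ∨ orientation = "diagonal" then
    let offset := min row col
    let row := row - offset
    let col := col - offset
    PySem.Set.ofList ((PySem.List.pyRange 0 (min (shape.1 - row) (shape.2 - col)) 1).map (fun i => (row + i, col + i)))
  else if orientation = "a" ∨ orientation = "antidiagonal" then
    let offset := min row (shape.2 - col - 1)
    let row := row - offset
    let col := col + offset
    PySem.Set.ofList ((PySem.List.pyRange 0 (min (shape.1 - row) (col + 1)) 1).map (fun i => (row + i, col - i)))
  else []  -- unreachable under Pre_line_coords (Python: assert fails / coords = None)

-- ===== PORT B =====
-- orientation → step delta (Source B's dict lookup; default never used under Pre_)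
def pvDelta (orientation : String) : Int × Int :=
  (PySem.Dict.get? (PySem.Dict.ofList
    [("h", ((0:Int), (1:Int))), ("horizontal", (0, 1)),
     ("v", (1, 0)), ("vertical", (1, 0)),
     ("d", (1, 1)), ("diagonal", (1, 1)),
     ("a", (1, -1)), ("antidiagonal", (1, -1))]) orientation).getD (0, 0)

def pvInb (shape : Int × Int) (r c : Int) : Bool :=
  decide (0 ≤ r ∧ r < shape.1 ∧ 0 ≤ c ∧ c < shape.2)

-- Source B's backward while loop (fuel is only a totality guard)
def pvBack (shape : Int × Int) (dr dc : Int) : Nat → Int → Int → Int × Int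
  | 0, r, c => (r, c)
  | fuel+1, r, c =>
    if pvInb shape (r - dr) (c - dc) then pvBack shape dr dc fuel (r - dr) (c - dc) else (r, c)

-- Source B's forward while loop, adding each visited cell to the set
def pvFwd (shape : Int × Int) (dr dc : Int) : Nat → Int → Int → PySem.Set (Int × Int) → PySem.Set (Int × Int)
  | 0, _, _, s => s
  | fuel+1, r, c, s =>
    if pvInb shape r c then pvFwd shape dr dc fuel (r + dr) (c + dc) (PySem.Set.add s (r, c)) else s

def line_coords_alt (shape : Int × Int) (pivot_position : Int × Int) (orientation : String) : List (Int × Int) :=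
  let row := PySem.Int.mod pivot_position.1 shape.1
  let col := PySem.Int.mod pivot_position.2 shape.2
  let d := pvDelta orientation
  let fuel := shape.1.toNat + shape.2.toNat + 1
  let start := pvBack shape d.1 d.2 fuel row col
  pvFwd shape d.1 d.2 fuel start.1 start.2 PySem.Set.empty

-- ===== PRECONDITION & SPEC =====
-- Pre_ excludes the inputs where A raises (ValueError for pivot ≥ shape, AssertionError for a bad
-- orientation, ZeroDivisionError for a zero dimension) and additionally restricts to POSITIVE shape
-- dimensions: a non-positive dimension is outside the function's natural domain, and A's values
-- there (empty or negative-coordinate lines from Python's negative-divisor %) are accidental.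
def Pre_line_coords (shape : Int × Int) (pivot_position : Int × Int) (orientation : String) : Prop :=
  0 < shape.1 ∧ 0 < shape.2 ∧ pivot_position.1 < shape.1 ∧ pivot_position.2 < shape.2 ∧
  orientation ∈ ["horizontal", "vertical", "diagonal", "antidiagonal", "h", "v", "d", "a"]

instance (shape : Int × Int) (pivot_position : Int × Int) (orientation : String) : Decidable (Pre_line_coords shape pivot_position orientation) := by unfold Pre_line_coords; infer_instance

def pvWitness_line_coords : (Int × Int) × (Int × Int) × String := ((3, 4), (1, 2), "d")

def Spec_line_coords (shape : Int × Int) (pivot_position : Int × Int) (orientation : String) (out : List (Int × Int)) : Prop := out = line_coords_alt shape pivot_position orientation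
instance (shape : Int × Int) (pivot_position : Int × Int) (orientation : String) (out : List (Int × Int)) : Decidable (Spec_line_coords shape pivot_position orientation out) := by unfold Spec_line_coords; infer_instance

-- ===== CLAIM (what is proved, stated in full; the proofs are below) =====
def Claim_equal_line_coords : Prop := ∀ (shape : Int × Int) (pivot_position : Int × Int) (orientation : String), Dom_line_coords shape pivot_position orientation → Pre_line_coords shape pivot_position orientation → Spec_line_coords shape pivot_position orientation (line_coords shape pivot_position orientation)

-- ===== LEMMAS AND PROOFS =====

theorem pvBack_h {H W : Int} : ∀ (fuel : Nat) (r c : Int),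
    0 ≤ r → r < H → 0 ≤ c → c < W → c.toNat ≤ fuel →
    pvBack (H, W) 0 1 fuel r c = (r, 0) := by
  intro fuel
  induction fuel with
  | zero => intro r c h1 h2 h3 h4 h5; simp [pvBack]; omega
  | succ n ih =>
    intro r c h1 h2 h3 h4 h5
    by_cases hc : 1 ≤ c
    · rw [pvBack, if_pos (by simp [pvInb]; omega)]
      simpa using ih r (c - 1) h1 h2 (by omega) (by omega) (by omega)
    · rw [pvBack, if_neg (by simp [pvInb]; omega)]
      congr 1; omega

theorem pvBack_v {H W : Int} : ∀ (fuel : Nat) (r c : Int),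
    0 ≤ r → r < H → 0 ≤ c → c < W → r.toNat ≤ fuel →
    pvBack (H, W) 1 0 fuel r c = (0, c) := by
  intro fuel
  induction fuel with
  | zero => intro r c h1 h2 h3 h4 h5; simp [pvBack]; omega
  | succ n ih =>
    intro r c h1 h2 h3 h4 h5
    by_cases hr : 1 ≤ r
    · rw [pvBack, if_pos (by simp [pvInb]; omega)]
      simpa using ih (r - 1) c (by omega) (by omega) h3 h4 (by omega)
    · rw [pvBack, if_neg (by simp [pvInb]; omega)]
      congr 1; omega

theorem pvBack_d {H W : Int} : ∀ (fuel : Nat) (r c : Int),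
    0 ≤ r → r < H → 0 ≤ c → c < W → (min r c).toNat ≤ fuel →
    pvBack (H, W) 1 1 fuel r c = (r - min r c, c - min r c) := by
  intro fuel
  induction fuel with
  | zero => intro r c h1 h2 h3 h4 h5; simp only [pvBack, Prod.mk.injEq]; omega
  | succ n ih =>
    intro r c h1 h2 h3 h4 h5
    by_cases hm : 1 ≤ r ∧ 1 ≤ c
    · rw [pvBack, if_pos (by simp [pvInb]; omega)]
      rw [show c - (1:Int) = c - 1 by ring, ih (r - 1) (c - 1) (by omega) (by omega) (by omega) (by omega) (by omega)]
      simp only [Prod.mk.injEq]; omega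
    · rw [pvBack, if_neg (by simp [pvInb]; omega)]
      simp only [Prod.mk.injEq]; omega

theorem pvBack_a {H W : Int} : ∀ (fuel : Nat) (r c : Int),
    0 ≤ r → r < H → 0 ≤ c → c < W → (min r (W - c - 1)).toNat ≤ fuel →
    pvBack (H, W) 1 (-1) fuel r c = (r - min r (W - c - 1), c + min r (W - c - 1)) := by
  intro fuel
  induction fuel with
  | zero => intro r c h1 h2 h3 h4 h5; simp only [pvBack, Prod.mk.injEq]; omega
  | succ n ih =>
    intro r c h1 h2 h3 h4 h5
    by_cases hm : 1 ≤ r ∧ c + 1 < W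
    · rw [pvBack, if_pos (by simp [pvInb]; omega)]
      rw [show c - (-1:Int) = c + 1 by ring, ih (r - 1) (c + 1) (by omega) (by omega) (by omega) (by omega) (by omega)]
      simp only [Prod.mk.injEq]; omega
    · rw [pvBack, if_neg (by simp [pvInb]; omega)]
      simp only [Prod.mk.injEq]; omega

theorem pvFwd_h {H W : Int} : ∀ (fuel : Nat) (r c : Int) (s : PySem.Set (Int × Int)),
    0 ≤ r → r < H → 0 ≤ c → (W - c).toNat ≤ fuel →
    pvFwd (H, W) 0 1 fuel r c s =
      ((PySem.List.pyRange c W 1).map (fun i => (r, i))).foldl PySem.Set.add s := by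
  intro fuel
  induction fuel with
  | zero =>
    intro r c s h1 h2 h3 h4
    rw [PySem.List.pyRange_one_eq_nil (by omega)]; simp [pvFwd]
  | succ n ih =>
    intro r c s h1 h2 h3 h4
    by_cases hc : c < W
    · rw [pvFwd, if_pos (by simp [pvInb]; omega), PySem.List.pyRange_one_cons hc]
      simp only [List.map_cons, List.foldl_cons]
      simpa using ih r (c + 1) _ h1 h2 (by omega) (by omega)
    · rw [pvFwd, if_neg (by simp [pvInb]; omega), PySem.List.pyRange_one_eq_nil (by omega)]
      simp

theorem pvFwd_v {H W : Int} : ∀ (fuel : Nat) (r c : Int) (s : PySem.Set (Int × Int)),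
    0 ≤ c → c < W → 0 ≤ r → (H - r).toNat ≤ fuel →
    pvFwd (H, W) 1 0 fuel r c s =
      ((PySem.List.pyRange r H 1).map (fun i => (i, c))).foldl PySem.Set.add s := by
  intro fuel
  induction fuel with
  | zero =>
    intro r c s h1 h2 h3 h4
    rw [PySem.List.pyRange_one_eq_nil (by omega)]; simp [pvFwd]
  | succ n ih =>
    intro r c s h1 h2 h3 h4
    by_cases hr : r < H
    · rw [pvFwd, if_pos (by simp [pvInb]; omega), PySem.List.pyRange_one_cons hr]
      simp only [List.map_cons, List.foldl_cons]
      simpa using ih (r + 1) c _ h1 h2 (by omega) (by omega)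
    · rw [pvFwd, if_neg (by simp [pvInb]; omega), PySem.List.pyRange_one_eq_nil (by omega)]
      simp

theorem pvFwd_d {H W : Int} : ∀ (fuel : Nat) (r c : Int) (s : PySem.Set (Int × Int)),
    0 ≤ r → 0 ≤ c → (min (H - r) (W - c)).toNat ≤ fuel →
    pvFwd (H, W) 1 1 fuel r c s =
      ((PySem.List.pyRange 0 (min (H - r) (W - c)) 1).map (fun i => (r + i, c + i))).foldl PySem.Set.add s := by
  intro fuel
  induction fuel with
  | zero =>
    intro r c s h1 h2 h3
    rw [PySem.List.pyRange_one_eq_nil (by omega)]; simp [pvFwd]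
  | succ n ih =>
    intro r c s h1 h2 h3
    by_cases hm : r < H ∧ c < W
    · rw [pvFwd, if_pos (by simp [pvInb]; omega)]
      have hrec := ih (r + 1) (c + 1) (PySem.Set.add s (r, c)) (by omega) (by omega) (by omega)
      rw [hrec, PySem.List.pyRange_one_cons (show (0:Int) < min (H - r) (W - c) by omega)]
      simp only [List.map_cons, List.foldl_cons, add_zero]
      congr 1
      rw [PySem.List.pyRange_one, PySem.List.pyRange_one, List.map_map, List.map_map,
        show (min (H - r) (W - c) - (0 + 1)).toNat = (min (H - (r + 1)) (W - (c + 1)) - 0).toNat by omega]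
      apply List.map_congr_left
      intro k hk
      simp only [Function.comp_apply, Prod.mk.injEq]
      omega
    · rw [pvFwd, if_neg (by simp [pvInb]; omega), PySem.List.pyRange_one_eq_nil (by omega)]
      simp

theorem pvFwd_a {H W : Int} : ∀ (fuel : Nat) (r c : Int) (s : PySem.Set (Int × Int)),
    0 ≤ r → c < W → (min (H - r) (c + 1)).toNat ≤ fuel →
    pvFwd (H, W) 1 (-1) fuel r c s =
      ((PySem.List.pyRange 0 (min (H - r) (c + 1)) 1).map (fun i => (r + i, c - i))).foldl PySem.Set.add s := by
  intro fuel
  induction fuel with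
  | zero =>
    intro r c s h1 h2 h3
    rw [PySem.List.pyRange_one_eq_nil (by omega)]; simp [pvFwd]
  | succ n ih =>
    intro r c s h1 h2 h3
    by_cases hm : r < H ∧ 0 ≤ c
    · rw [pvFwd, if_pos (by simp [pvInb]; omega)]
      have hrec := ih (r + 1) (c - 1) (PySem.Set.add s (r, c)) (by omega) (by omega) (by omega)
      rw [show c + (-1 : Int) = c - 1 by ring, hrec,
        PySem.List.pyRange_one_cons (show (0:Int) < min (H - r) (c + 1) by omega)]
      simp only [List.map_cons, List.foldl_cons, add_zero, sub_zero]
      congr 1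
      rw [PySem.List.pyRange_one, PySem.List.pyRange_one, List.map_map, List.map_map,
        show (min (H - r) (c + 1) - (0 + 1)).toNat = (min (H - (r + 1)) ((c - 1) + 1) - 0).toNat by omega]
      apply List.map_congr_left
      intro k hk
      simp only [Function.comp_apply, Prod.mk.injEq]
      omega
    · rw [pvFwd, if_neg (by simp [pvInb]; omega), PySem.List.pyRange_one_eq_nil (by omega)]
      simp

-- ===== VERDICT (by name: the statement is the Claim_ definition above) =====
theorem line_coords_spec : Claim_equal_line_coords := by
  intro shape pivot orientation _ hpre
  obtain ⟨H, W⟩ := shape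
  obtain ⟨p1, p2⟩ := pivot
  obtain ⟨hH, hW, hp1, hp2, ho⟩ := hpre
  unfold Spec_line_coords line_coords line_coords_alt
  set r := PySem.Int.mod p1 H with hr
  set c := PySem.Int.mod p2 W with hc
  have hr0 : 0 ≤ r := PySem.Int.mod_nonneg p1 hH
  have hrH : r < H := PySem.Int.mod_lt p1 hH
  have hc0 : 0 ≤ c := PySem.Int.mod_nonneg p2 hW
  have hcW : c < W := PySem.Int.mod_lt p2 hW
  have hfuel : ∀ x : Int, x ≤ H ∨ x ≤ W → x.toNat ≤ H.toNat + W.toNat + 1 := by intro x hx; omega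
  fin_cases ho
  all_goals simp only [String.reduceEq, or_self, or_false, false_or]
  · simp only [show pvDelta "horizontal" = ((0:Int), (1:Int)) from by decide]
    rw [pvBack_h _ r c hr0 hrH hc0 hcW (hfuel c (Or.inr (by omega)))]
    refine ((pvFwd_h _ r 0 PySem.Set.empty hr0 hrH le_rfl (hfuel (W - 0) (Or.inr (by omega)))).trans ?_).symm
    rfl
  · simp only [show pvDelta "vertical" = ((1:Int), (0:Int)) from by decide]
    rw [pvBack_v _ r c hr0 hrH hc0 hcW (hfuel r (Or.inl (by omega)))]
    refine ((pvFwd_v _ 0 c PySem.Set.empty hc0 hcW le_rfl (hfuel (H - 0) (Or.inl (by omega)))).trans ?_).symm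
    rfl
  · simp only [show pvDelta "diagonal" = ((1:Int), (1:Int)) from by decide]
    rw [pvBack_d _ r c hr0 hrH hc0 hcW (hfuel (min r c) (Or.inl (by omega)))]
    refine ((pvFwd_d _ (r - min r c) (c - min r c) PySem.Set.empty (by omega) (by omega) (hfuel _ (Or.inl (by omega)))).trans ?_).symm
    rfl
  · simp only [show pvDelta "antidiagonal" = ((1:Int), (-1:Int)) from by decide]
    rw [pvBack_a _ r c hr0 hrH hc0 hcW (hfuel (min r (W - c - 1)) (Or.inl (by omega)))]
    refine ((pvFwd_a _ (r - min r (W - c - 1)) (c + min r (W - c - 1)) PySem.Set.empty (by omega) (by omega) (hfuel _ (Or.inl (by omega)))).trans ?_).symm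
    rfl
  · simp only [show pvDelta "h" = ((0:Int), (1:Int)) from by decide]
    rw [pvBack_h _ r c hr0 hrH hc0 hcW (hfuel c (Or.inr (by omega)))]
    refine ((pvFwd_h _ r 0 PySem.Set.empty hr0 hrH le_rfl (hfuel (W - 0) (Or.inr (by omega)))).trans ?_).symm
    rfl
  · simp only [show pvDelta "v" = ((1:Int), (0:Int)) from by decide]
    rw [pvBack_v _ r c hr0 hrH hc0 hcW (hfuel r (Or.inl (by omega)))]
    refine ((pvFwd_v _ 0 c PySem.Set.empty hc0 hcW le_rfl (hfuel (H - 0) (Or.inl (by omega)))).trans ?_).symm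
    rfl
  · simp only [show pvDelta "d" = ((1:Int), (1:Int)) from by decide]
    rw [pvBack_d _ r c hr0 hrH hc0 hcW (hfuel (min r c) (Or.inl (by omega)))]
    refine ((pvFwd_d _ (r - min r c) (c - min r c) PySem.Set.empty (by omega) (by omega) (hfuel _ (Or.inl (by omega)))).trans ?_).symm
    rfl
  · simp only [show pvDelta "a" = ((1:Int), (-1:Int)) from by decide]
    rw [pvBack_a _ r c hr0 hrH hc0 hcW (hfuel (min r (W - c - 1)) (Or.inl (by omega)))]
    refine ((pvFwd_a _ (r - min r (W - c - 1)) (c + min r (W - c - 1)) PySem.Set.empty (by omega) (by omega) (hfuel _ (Or.inl (by omega)))).trans ?_).symm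
    rfl
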